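-- pv_equiv track=rewrite | github.com/franklee0001/zoho-books | scripts/06_sample_view.py | detect_body_key
-- ===== SOURCE A (Python) =====
-- from typing import Any, Dict, Iterable, List, Optional, Tuple
--
-- BODY_KEY_CANDIDATES = [
--     "invoice",
--     "contact",
--     "item",
--     "organization",
--     "creditnote",
--     "estimate",
--     "salesorder",
--     "purchaseorder",
--     "bill",
--     "payment",
--     "organizations",
--     "invoices",
--     "contacts",
--     "items",
--     "payments",
--     "creditnotes",
--     "estimates",
--     "salesorders",
--     "purchaseorders",
--     "bills",
-- ]
--
-- def detect_body_key(payload: Any) -> Optional[str]: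
--     if not isinstance(payload, dict):
--         return None
--     for key in BODY_KEY_CANDIDATES:
--         if key in payload:
--             return key
--     if len(payload) == 1:
--         return next(iter(payload.keys()))
--     return None
-- ===== SOURCE B (Python) =====
-- from typing import Any, Optional
--
-- BODY_KEY_CANDIDATES = [
--     "invoice",
--     "contact",
--     "item",
--     "organization",
--     "creditnote",
--     "estimate",
--     "salesorder",
--     "purchaseorder",
--     "bill",
--     "payment",
--     "organizations",
--     "invoices",
--     "contacts",
--     "items",
--     "payments",
--     "creditnotes",
--     "estimates",
--     "salesorders",
--     "purchaseorders",
--     "bills",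
-- ]
--
-- PRIORITY = {k: i for i, k in enumerate(BODY_KEY_CANDIDATES)}
--
-- def detect_body_key(payload: Any) -> Optional[str]:
--     if not isinstance(payload, dict):
--         return None
--     best = None  # (priority index, key)
--     for key in payload:
--         i = PRIORITY.get(key)
--         if i is not None and (best is None or i < best[0]):
--             best = (i, key)
--     if best is not None:
--         return best[1]
--     if len(payload) == 1:
--         return next(iter(payload))
--     return None
-- ===== Notes on version B (the rewrite author's own statement) =====
-- stated objective: alternative
-- what changed: Instead of scanning BODY_KEY_CANDIDATES and probing the payload dict for each candidate, B precomputes a candidate->priority-index dict once and makes a single pass over the payload's keys tracking the key with the minimum priority index; the len==1 single-key fallback and None default are unchanged.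
import Mathlib
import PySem

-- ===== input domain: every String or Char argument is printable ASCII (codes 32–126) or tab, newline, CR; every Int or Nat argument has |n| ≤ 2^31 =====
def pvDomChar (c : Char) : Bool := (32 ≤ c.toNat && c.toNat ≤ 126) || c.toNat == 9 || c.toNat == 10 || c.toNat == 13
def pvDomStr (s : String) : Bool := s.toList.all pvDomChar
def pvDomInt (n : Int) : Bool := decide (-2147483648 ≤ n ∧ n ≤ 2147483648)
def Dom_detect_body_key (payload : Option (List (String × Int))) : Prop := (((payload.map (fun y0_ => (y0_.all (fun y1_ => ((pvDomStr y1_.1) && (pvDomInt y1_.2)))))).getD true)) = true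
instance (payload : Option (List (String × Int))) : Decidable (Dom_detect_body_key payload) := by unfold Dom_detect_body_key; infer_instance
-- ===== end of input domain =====

-- B iterates over the payload's keys tracking the minimum candidate-priority index (via a precomputed
-- priority map) instead of scanning the candidate list and probing the dict; alternative decomposition,
-- not claimed faster. Return-value equivalence only (neither program mutates its argument).

-- ===== PORT A =====
-- BODY_KEY_CANDIDATES (module constant shared by both programs)
def pvCandidates : List String :=
  ["invoice", "contact", "item", "organization", "creditnote", "estimate", "salesorder",
   "purchaseorder", "bill", "payment", "organizations", "invoices", "contacts", "items",
   "payments", "creditnotes", "estimates", "salesorders", "purchaseorders", "bills"]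

-- payload : Option (dict) — none is Python's "not a dict". A dict's keys are its distinct
-- first-occurrence keys, so ks := dedup of the key column ('key in payload', len, iter all read it).
def detect_body_key (payload : Option (List (String × Int))) : Option String :=
  match payload with
  | none => none
  | some d =>
    let ks := PySem.List.dedup (d.map Prod.fst)
    match pvCandidates.find? (fun key => ks.contains key) with
    | some key => some key
    | none => if ks.length = 1 then ks.head? else none

-- ===== PORT B =====
-- PRIORITY = {k: i for i, k in enumerate(BODY_KEY_CANDIDATES)} (assoc list in insertion order)
def pvMkPrio : List String → Nat → List (String × Nat)
  | [], _ => []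
  | c :: cs, i => (c, i) :: pvMkPrio cs (i + 1)

def pvPriority : List (String × Nat) := pvMkPrio pvCandidates 0

-- dict.get on the assoc list (first match)
def pvGetPrio (k : String) : List (String × Nat) → Option Nat
  | [] => none
  | (c, i) :: rest => if k = c then some i else pvGetPrio k rest

-- one iteration of B's loop body: PRIORITY.get(key) and the best-so-far update
def pvStep (best : Option (Nat × String)) (key : String) : Option (Nat × String) :=
  match pvGetPrio key pvPriority with
  | none => best
  | some i =>
    match best with
    | none => some (i, key)
    | some (j, _) => if i < j then some (i, key) else best

def detect_body_key_alt (payload : Option (List (String × Int))) : Option String :=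
  match payload with
  | none => none
  | some d =>
    let ks := PySem.List.dedup (d.map Prod.fst)
    match ks.foldl pvStep none with
    | some (_, key) => some key
    | none => if ks.length = 1 then ks.head? else none

-- ===== PRECONDITION & SPEC =====
def Spec_detect_body_key (payload : Option (List (String × Int))) (out : Option String) : Prop := out = detect_body_key_alt payload
instance (payload : Option (List (String × Int))) (out : Option String) : Decidable (Spec_detect_body_key payload out) := by unfold Spec_detect_body_key; infer_instance

-- ===== CLAIM (what is proved, stated in full; the proofs are below) =====
def Claim_equal_detect_body_key : Prop := ∀ (payload : Option (List (String × Int))), Dom_detect_body_key payload → Spec_detect_body_key payload (detect_body_key payload)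

-- ===== LEMMAS AND PROOFS =====

-- option-minimum used to describe the index tracked by B's fold
def pvOmin : Option Nat → Option Nat → Option Nat
  | none, b => b
  | some i, none => some i
  | some i, some j => some (min i j)

def pvPr (k : String) : Option Nat := pvGetPrio k pvPriority

lemma getPrio_mkPrio_none (cs : List String) (off : Nat) (k : String) :
    pvGetPrio k (pvMkPrio cs off) = none ↔ k ∉ cs := by
  induction cs generalizing off with
  | nil => simp [pvMkPrio, pvGetPrio]
  | cons c cs ih =>
    by_cases h : k = c
    · subst h; simp [pvMkPrio, pvGetPrio]
    · simp [pvMkPrio, pvGetPrio, h, ih]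

lemma getPrio_mkPrio_some (cs : List String) (off : Nat) (k : String) (i : Nat)
    (hnd : cs.Nodup) :
    pvGetPrio k (pvMkPrio cs off) = some i ↔
      ∃ j, j < cs.length ∧ i = off + j ∧ cs[j]? = some k := by
  induction cs generalizing off with
  | nil => simp [pvMkPrio, pvGetPrio]
  | cons c cs ih =>
    by_cases h : k = c
    · subst h
      simp only [pvMkPrio, pvGetPrio, if_pos trivial, Option.some.injEq]
      constructor
      · rintro rfl
        exact ⟨0, by simp, by omega, by simp⟩
      · rintro ⟨j, hj, hij, hget⟩
        rcases j with _ | j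
        · omega
        · exfalso
          have hmem : k ∈ cs := by
            have h2 := List.getElem?_eq_some_iff.mp hget
            rcases h2 with ⟨hlt, hv⟩
            simp only [List.getElem_cons_succ] at hv
            exact hv ▸ List.getElem_mem _
          exact (List.nodup_cons.mp hnd).1 hmem
    · simp only [pvMkPrio, pvGetPrio, if_neg h]
      rw [ih (off + 1) (List.nodup_cons.mp hnd).2]
      constructor
      · rintro ⟨j, hj, hij, hget⟩
        exact ⟨j + 1, by simpa using hj, by omega, by simpa using hget⟩
      · rintro ⟨j, hj, hij, hget⟩
        rcases j with _ | j
        · exfalso; simp at hget; exact h hget.symm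
        · exact ⟨j, by simpa using hj, by omega, by simpa using hget⟩

lemma pvPr_none (k : String) : pvPr k = none ↔ k ∉ pvCandidates := by
  simpa [pvPr, pvPriority] using getPrio_mkPrio_none pvCandidates 0 k

lemma pvPr_some (k : String) (i : Nat) :
    pvPr k = some i ↔ i < pvCandidates.length ∧ pvCandidates[i]? = some k := by
  rw [pvPr, pvPriority, getPrio_mkPrio_some pvCandidates 0 k i (by decide)]
  constructor
  · rintro ⟨j, hj, hij, hget⟩; subst hij; simpa using ⟨hj, hget⟩
  · rintro ⟨hi, hget⟩; exact ⟨i, hi, by omega, hget⟩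

-- the invariant B's accumulator maintains: a stored pair is (i, pvCandidates[i])
def pvInv (b : Option (Nat × String)) : Prop :=
  ∀ i k, b = some (i, k) → i < pvCandidates.length ∧ pvCandidates[i]? = some k

lemma pvStep_inv (b : Option (Nat × String)) (k : String) (hb : pvInv b) :
    pvInv (pvStep b k) := by
  intro i' k' h
  unfold pvStep at h
  cases hpr : pvGetPrio k pvPriority with
  | none => rw [hpr] at h; exact hb _ _ h
  | some i =>
    rw [hpr] at h
    have hchar := (pvPr_some k i).mp hpr
    cases b with
    | none => cases h; exact hchar
    | some p =>
      obtain ⟨j, k₀⟩ := p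
      by_cases hij : i < j
      · simp [hij] at h; obtain ⟨h1, h2⟩ := h; subst h1; subst h2; exact hchar
      · simp [hij] at h; obtain ⟨h1, h2⟩ := h; subst h1; subst h2; exact hb _ _ rfl

lemma pvFold_inv (ks : List String) (b : Option (Nat × String)) (hb : pvInv b) :
    pvInv (ks.foldl pvStep b) := by
  induction ks generalizing b with
  | nil => exact hb
  | cons k ks ih => exact ih _ (pvStep_inv b k hb)

lemma pvStep_fst (b : Option (Nat × String)) (k : String) :
    (pvStep b k).map Prod.fst = pvOmin (b.map Prod.fst) (pvPr k) := by
  unfold pvStep pvPr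
  cases hpr : pvGetPrio k pvPriority with
  | none => cases b with
    | none => rfl
    | some p => obtain ⟨j, k₀⟩ := p; rfl
  | some i =>
    cases b with
    | none => rfl
    | some p =>
      obtain ⟨j, k₀⟩ := p
      by_cases hij : i < j
      · simp [hij, pvOmin, Nat.min_eq_right (Nat.le_of_lt hij)]
      · simp [hij, pvOmin, Nat.min_eq_left (Nat.le_of_not_lt hij)]

lemma pvFold_fst (ks : List String) (b : Option (Nat × String)) :
    (ks.foldl pvStep b).map Prod.fst
      = ks.foldl (fun m k => pvOmin m (pvPr k)) (b.map Prod.fst) := by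
  induction ks generalizing b with
  | nil => rfl
  | cons k ks ih => simp only [List.foldl_cons, ih, pvStep_fst]

lemma pvOmin_none_left (b : Option Nat) : pvOmin none b = b := rfl

lemma pvOmin_assoc (a b c : Option Nat) :
    pvOmin (pvOmin a b) c = pvOmin a (pvOmin b c) := by
  cases a <;> cases b <;> cases c <;> simp [pvOmin, Nat.min_assoc]

-- the index fold over the key list
def pvF (ks : List String) : Option Nat := ks.foldl (fun m k => pvOmin m (pvPr k)) none

lemma pvF_general (ks : List String) (m : Option Nat) :
    ks.foldl (fun m k => pvOmin m (pvPr k)) m = pvOmin m (pvF ks) := by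
  induction ks generalizing m with
  | nil => cases m <;> simp [pvF, pvOmin]
  | cons k ks ih =>
    simp only [pvF, List.foldl_cons] at *
    rw [ih, ih (pvOmin none (pvPr k)), pvOmin_none_left, pvOmin_assoc]

lemma pvF_cons (k : String) (ks : List String) :
    pvF (k :: ks) = pvOmin (pvPr k) (pvF ks) := by
  simp only [pvF, List.foldl_cons]
  have := pvF_general ks (pvOmin none (pvPr k))
  rwa [pvOmin_none_left] at this

lemma pvOmin_eq_none (a b : Option Nat) : pvOmin a b = none ↔ a = none ∧ b = none := by
  cases a <;> cases b <;> simp [pvOmin]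

lemma pvF_none (ks : List String) : pvF ks = none ↔ ∀ k ∈ ks, pvPr k = none := by
  induction ks with
  | nil => simp [pvF]
  | cons k ks ih => simp [pvF_cons, pvOmin_eq_none, ih]

lemma pvF_some_mem (ks : List String) :
    ∀ i, pvF ks = some i → ∃ k ∈ ks, pvPr k = some i := by
  induction ks with
  | nil => intro i h; simp [pvF] at h
  | cons k ks ih =>
    intro i h
    rw [pvF_cons] at h
    cases ha : pvPr k with
    | none =>
      rw [ha] at h
      simp only [pvOmin] at h
      obtain ⟨k', hk', hpr⟩ := ih i h
      exact ⟨k', List.mem_cons_of_mem _ hk', hpr⟩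
    | some a =>
      rw [ha] at h
      cases hb : pvF ks with
      | none => rw [hb] at h; simp [pvOmin] at h; exact ⟨k, List.mem_cons_self, by rw [ha, h]⟩
      | some b =>
        rw [hb] at h
        simp only [pvOmin, Option.some.injEq] at h
        rcases Nat.le_total a b with hle | hle
        · refine ⟨k, List.mem_cons_self, ?_⟩
          rw [ha, ← h, Nat.min_eq_left hle]
        · obtain ⟨k', hk', hpr⟩ := ih b hb
          refine ⟨k', List.mem_cons_of_mem _ hk', ?_⟩
          rw [hpr, ← h, Nat.min_eq_right hle]

lemma pvF_some_min (ks : List String) :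
    ∀ i, pvF ks = some i → ∀ k ∈ ks, ∀ j, pvPr k = some j → i ≤ j := by
  induction ks with
  | nil => intro i h; simp [pvF] at h
  | cons k ks ih =>
    intro i h
    rw [pvF_cons] at h
    intro k' hk' j hj
    rcases List.mem_cons.mp hk' with rfl | hmem
    · rw [hj] at h
      cases hb : pvF ks with
      | none => rw [hb] at h; simp [pvOmin] at h; omega
      | some b => rw [hb] at h; simp only [pvOmin, Option.some.injEq] at h; omega
    · cases hb : pvF ks with
      | none =>
        exfalso
        have := (pvF_none ks).mp hb k' hmem
        rw [this] at hj; cases hj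
      | some b =>
        have hbj : b ≤ j := ih b hb k' hmem j hj
        rw [hb] at h
        cases ha : pvPr k with
        | none => rw [ha] at h; simp [pvOmin] at h; omega
        | some a => rw [ha] at h; simp only [pvOmin, Option.some.injEq] at h; omega

-- ===== VERDICT (by name: the statement is the Claim_ definition above) =====
theorem detect_body_key_spec : Claim_equal_detect_body_key := by
  unfold Claim_equal_detect_body_key
  intro payload _
  unfold Spec_detect_body_key
  cases payload with
  | none => rfl
  | some d =>
    simp only [detect_body_key, detect_body_key_alt]
    set ks := PySem.List.dedup (d.map Prod.fst) with hks
    cases hfold : ks.foldl pvStep none with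
    | none =>
      -- B found no candidate key: no key of ks is a candidate
      have hF : pvF ks = none := by
        have := pvFold_fst ks none
        rw [hfold] at this
        simpa [pvF] using this.symm
      have hnone : pvCandidates.find? (fun key => ks.contains key) = none := by
        rw [List.find?_eq_none]
        intro c hc
        simp only [Bool.not_eq_true, List.contains_eq_mem, decide_eq_false_iff_not]
        intro hmem
        have := (pvF_none ks).mp hF c hmem
        exact (pvPr_none c).mp this hc
      rw [hnone]
    | some p =>
      obtain ⟨i, k⟩ := p
      have hinv : i < pvCandidates.length ∧ pvCandidates[i]? = some k :=
        pvFold_inv ks none (by intro _ _ h; cases h) i k hfold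
      obtain ⟨hi, hget⟩ := hinv
      have hF : pvF ks = some i := by
        have := pvFold_fst ks none
        rw [hfold] at this
        simpa [pvF] using this.symm
      obtain ⟨k', hk'mem, hk'pr⟩ := pvF_some_mem ks i hF
      have hk'get := ((pvPr_some k' i).mp hk'pr).2
      have hkk' : k' = k := by
        rw [hget] at hk'get; exact (Option.some.injEq _ _).mp hk'get.symm
      subst hkk'
      have hgetElem : pvCandidates[i]'hi = k' := by
        have := List.getElem?_eq_some_iff.mp hget
        exact this.2
      have hfind : pvCandidates.find? (fun key => ks.contains key) = some k' := by
        rw [List.find?_eq_some_iff_getElem]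
        refine ⟨by simpa [List.contains_eq_mem] using hk'mem, i, hi, hgetElem, ?_⟩
        intro j hj
        simp only [Bool.not_eq_true', List.contains_eq_mem, decide_eq_false_iff_not]
        intro hjmem
        have hjpr : pvPr (pvCandidates[j]'(by omega)) = some j :=
          (pvPr_some _ j).mpr ⟨by omega, by simp⟩
        have := pvF_some_min ks i hF _ hjmem j hjpr
        omega
      rw [hfind]
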